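-- pv_equiv track=rewrite | github.com/HansBambel/AoC2024 | aoc/day21/day21.py | is_optimal
-- ===== SOURCE A (Python) =====
-- def is_optimal(sequence: str) -> bool:
--     for sub_seq in sequence.split("A"):
--         for i, char in enumerate(sub_seq):
--             other_char_between = False
--             for next_char in sub_seq[i + 1 :]:
--                 if char != next_char:
--                     other_char_between = True
--                 if char == next_char and other_char_between:
--                     return False
--     return True
-- ===== SOURCE B (Python) =====
-- def is_optimal(sequence: str) -> bool:
--     for sub in sequence.split("A"):
--         seen = set()
--         prev = None
--         for c in sub:
--             if prev is not None and c != prev: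
--                 seen.add(prev)
--             if c in seen:
--                 return False
--             prev = c
--     return True
-- ===== Notes on version B (the rewrite author's own statement) =====
-- stated objective: faster
-- what changed: Replaced the nested enumerate+slice rescans with a single pass per A-substring that maintains a set of closed-off characters and fails when one reappears.
import Mathlib
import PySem

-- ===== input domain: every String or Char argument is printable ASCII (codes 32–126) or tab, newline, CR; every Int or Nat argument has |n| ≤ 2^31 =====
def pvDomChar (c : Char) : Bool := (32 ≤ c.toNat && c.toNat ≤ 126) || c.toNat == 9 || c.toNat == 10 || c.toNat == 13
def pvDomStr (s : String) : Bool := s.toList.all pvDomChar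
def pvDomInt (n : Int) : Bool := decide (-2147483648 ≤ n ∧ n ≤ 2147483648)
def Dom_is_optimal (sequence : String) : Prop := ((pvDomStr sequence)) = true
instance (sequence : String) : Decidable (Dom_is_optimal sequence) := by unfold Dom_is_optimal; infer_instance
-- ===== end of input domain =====

-- B replaces A's nested enumerate+slice rescans by one pass per A-substring with a set of
-- closed-off characters (objective: faster; return value only, no side effects in either).

-- ===== PORT A =====
-- inner loop 'for next_char in sub_seq[i+1:]' with the flag `other_char_between`;
-- returns false exactly when Python's `return False` fires inside this loop.
def innerA (char : Char) (rest : List Char) (flag : Bool) : Bool :=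
  match rest with
  | [] => true
  | next :: xs =>
    let flag := if char ≠ next then true else flag
    if char = next ∧ flag then false else innerA char xs flag

-- middle loop 'for i, char in enumerate(sub_seq)': at position i the slice sub_seq[i+1:]
-- is the tail of the structural recursion.
def scanA : List Char → Bool
  | [] => true
  | char :: rest => innerA char rest false && scanA rest

def is_optimal (sequence : String) : Bool :=
  (PySem.Chars.splitOn sequence.toList "A".toList).all (fun sub => scanA sub)

-- ===== PORT B =====
-- one pass: `seen` = characters whose block is finished, `prev` = previous character.
def scanB (s : List Char) (seen : PySem.Set Char) (prev : Option Char) : Bool :=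
  match s with
  | [] => true
  | c :: rest =>
    let seen := match prev with
      | some p => if c ≠ p then seen.add p else seen
      | none => seen
    if seen.contains c then false else scanB rest seen (some c)

def is_optimal_alt (sequence : String) : Bool :=
  (PySem.Chars.splitOn sequence.toList "A".toList).all (fun sub => scanB sub PySem.Set.empty none)

-- ===== PRECONDITION & SPEC =====
def Spec_is_optimal (sequence : String) (out : Bool) : Prop := out = is_optimal_alt sequence
instance (sequence : String) (out : Bool) : Decidable (Spec_is_optimal sequence out) := by unfold Spec_is_optimal; infer_instance

-- ===== CLAIM (what is proved, stated in full; the proofs are below) =====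
def Claim_equal_is_optimal : Prop := ∀ (sequence : String), Dom_is_optimal sequence → Spec_is_optimal sequence (is_optimal sequence)

-- ===== LEMMAS AND PROOFS =====

-- once the flag is set, innerA is just "char does not occur in the rest"
lemma innerA_true (char : Char) (rest : List Char) :
    innerA char rest true = !(rest.contains char) := by
  induction rest with
  | nil => simp [innerA]
  | cons x xs ih =>
    by_cases h : char = x <;> simp [innerA, h, ih]

-- B's state (seen, some p) with p ∉ seen computes A's scan of p :: s, guarded by
-- "no already-closed character occurs in s"
lemma scanB_some (s : List Char) (seen : PySem.Set Char) (p : Char) (hp : p ∉ seen) :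
    scanB s seen (some p) = (scanA (p :: s) && decide (∀ x ∈ seen, x ∉ s)) := by
  induction s generalizing seen p with
  | nil => simp [scanB, scanA, innerA]
  | cons c rest ih =>
    have hcont : ∀ (t : PySem.Set Char) (x : Char), t.contains x = decide (x ∈ t) := by
      intro t x; simp [PySem.Set.contains]
    have hmem_add : ∀ (t : PySem.Set Char) (y x : Char),
        x ∈ t.add y ↔ x ∈ t ∨ x = y := by
      intro t y x
      simp only [PySem.Set.add, hcont]
      by_cases hy : y ∈ t
      · simp only [hy, decide_true, if_true]
        constructor
        · exact Or.inl
        · rintro (h | rfl) <;> assumption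
      · simp [hy]
    by_cases hcp : c = p
    · subst hcp
      simp only [scanB, ne_eq, not_true_eq_false, if_false, hcont]
      rw [if_neg (by simpa using hp), ih seen c hp]
      have hinner : innerA c (c :: rest) false = innerA c rest false := by
        simp [innerA]
      have hguard : decide (∀ x ∈ seen, x ∉ c :: rest) =
          decide (∀ x ∈ seen, x ∉ rest) := by
        simp only [decide_eq_decide, List.mem_cons]
        constructor
        · intro h x hx hxr; exact h x hx (Or.inr hxr)
        · intro h x hx hxc
          rcases hxc with rfl | hxr
          · exact hp hx
          · exact h x hx hxr
      simp only [scanA, hinner, hguard]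
      cases scanA rest <;> cases innerA c rest false <;> simp
    · -- c ≠ p: p's block is closed; B fails iff c was closed before or the rest misbehaves
      simp only [scanB, ne_eq, hcp, not_false_eq_true, if_true, hcont]
      by_cases hc : c ∈ seen
      · rw [if_pos (by simpa using (hmem_add seen p c).mpr (Or.inl hc))]
        have : ¬ (∀ x ∈ seen, x ∉ c :: rest) := by
          intro h; exact h c hc (List.mem_cons_self ..)
        rw [decide_eq_false this, Bool.and_false]
      · have hc' : c ∉ seen.add p := by
          rw [hmem_add]; rintro (h | h); exact hc h; exact hcp h
        rw [if_neg (by simpa using hc'), ih (seen.add p) c hc']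
        have hguard : decide (∀ x ∈ seen.add p, x ∉ rest) =
            ((!(rest.contains p)) && decide (∀ x ∈ seen, x ∉ rest)) := by
          rcases Bool.eq_false_or_eq_true (rest.contains p) with h | h
          · have hpr : p ∈ rest := by simpa using h
            simp only [h, Bool.not_true, Bool.false_and]
            exact decide_eq_false (fun hall =>
              hall p ((hmem_add seen p p).mpr (Or.inr rfl)) hpr)
          · have hpr : p ∉ rest := by simpa using h
            simp only [h, Bool.not_false, Bool.true_and, decide_eq_decide]
            constructor
            · intro hall x hx; exact hall x ((hmem_add seen p x).mpr (Or.inl hx))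
            · intro hall x hx
              rcases (hmem_add seen p x).mp hx with h' | rfl
              · exact hall x h'
              · exact hpr
        have hA : scanA (p :: c :: rest) =
            ((!(rest.contains p)) && scanA (c :: rest)) := by
          have hpc : ¬ p = c := fun h => hcp h.symm
          have h1 : innerA p (c :: rest) false = innerA p rest true := by
            simp [innerA, hpc]
          simp only [scanA, h1, innerA_true]
        have hguard2 : decide (∀ x ∈ seen, x ∉ c :: rest) =
            decide (∀ x ∈ seen, x ∉ rest) := by
          simp only [decide_eq_decide, List.mem_cons]
          constructor
          · intro h x hx hxr; exact h x hx (Or.inr hxr)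
          · intro h x hx hxc
            rcases hxc with rfl | hxr
            · exact hc hx
            · exact h x hx hxr
        rw [hA, hguard, hguard2]
        cases (rest.contains p) <;> cases scanA (c :: rest) <;>
          cases decide (∀ x ∈ seen, x ∉ rest) <;> simp

-- from an empty-seen start, B equals A's scan
lemma scanB_eq_scanA (s : List Char) :
    scanB s PySem.Set.empty none = scanA s := by
  cases s with
  | nil => rfl
  | cons c rest =>
    have h0 : PySem.Set.empty.contains c = false := rfl
    simp only [scanB, h0]
    rw [scanB_some rest PySem.Set.empty c (by simp [PySem.Set.empty])]
    simp [scanA]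

-- ===== VERDICT (by name: the statement is the Claim_ definition above) =====
theorem is_optimal_spec : Claim_equal_is_optimal := by
  intro seq _
  unfold Spec_is_optimal is_optimal is_optimal_alt
  congr 1
  funext sub
  rw [scanB_eq_scanA]
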